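-- pv_equiv track=rewrite | github.com/ermiyastesfaye-lab/A2SV_CP | A2SV G6 - Round #3 19-Feb-2025/C - Minimal TV Subscriptions 274431.py | minimalTv
-- ===== SOURCE A (Python) =====
-- from collections import defaultdict
--
-- def minimalTv(arr, d):
--     left = 0
--     window = defaultdict(int)
--     for i in range(d):
--         window[arr[i]]+=1
--     min_sub = len(window)
--     for right in range(d, len(arr)):
--         window[arr[left]]-=1
--         if window[arr[left]] == 0:
--             del window[arr[left]]
--         window[arr[right]]+=1
--         left+=1
--         min_sub = min(min_sub, len(window))
--     return min_sub
-- ===== SOURCE B (Python) =====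
-- def minimalTv(arr, d):
--     # recompute the distinct count of each window from scratch; no incremental state
--     return min(len(set(arr[i:i + d])) for i in range(len(arr) - d + 1))
-- ===== Notes on version B (the rewrite author's own statement) =====
-- stated objective: simpler
-- what changed: Replaces the incremental sliding-window counter dict (decrement/delete/increment per step) by an independent per-window recomputation: one min over len(set(arr[i:i+d])) for every start index, maintaining no state across windows.
import Mathlib
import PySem

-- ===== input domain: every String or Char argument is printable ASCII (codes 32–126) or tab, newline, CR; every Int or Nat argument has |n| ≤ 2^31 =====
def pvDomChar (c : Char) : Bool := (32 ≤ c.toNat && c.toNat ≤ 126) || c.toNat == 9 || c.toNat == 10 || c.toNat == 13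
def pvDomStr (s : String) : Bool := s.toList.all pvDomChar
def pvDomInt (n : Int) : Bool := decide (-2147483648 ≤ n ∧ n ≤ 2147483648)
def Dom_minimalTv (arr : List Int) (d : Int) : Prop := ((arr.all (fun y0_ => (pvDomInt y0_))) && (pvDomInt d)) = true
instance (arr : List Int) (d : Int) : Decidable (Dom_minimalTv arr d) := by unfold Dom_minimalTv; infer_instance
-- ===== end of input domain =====

-- B replaces A's incremental sliding-window counter dict by an independent per-window
-- recomputation (min over the distinct count of each slice); same values, no speedup claimed.


-- ===== PORT A =====
-- the body of A's sliding-window loop; state = (left, window, min_sub)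
def stepA (arr : List Int) (st : Int × PySem.Dict Int Int × Int) (r : Int) :
    Int × PySem.Dict Int Int × Int :=
  let kL := PySem.List.pyGetD arr st.1 0
  let w1 := (st.2.1).modify kL 0 (· - 1)
  let w2 := if w1.getD kL 0 = 0 then w1.erase kL else w1
  let w3 := w2.modify (PySem.List.pyGetD arr r 0) 0 (· + 1)
  (st.1 + 1, w3, min st.2.2 (w3.size : Int))

-- index accesses use pyGetD (exact for the in-range indices Pre_ admits)
def minimalTv (arr : List Int) (d : Int) : Int :=
  let window : PySem.Dict Int Int :=
    (PySem.List.pyRange 0 d).foldl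
      (fun w i => w.modify (PySem.List.pyGetD arr i 0) 0 (· + 1)) PySem.Dict.empty
  ((PySem.List.pyRange d (arr.length : Int)).foldl (stepA arr)
      (0, window, (window.size : Int))).2.2

-- ===== PORT B =====
def minimalTv_alt (arr : List Int) (d : Int) : Int :=
  let counts := (PySem.List.pyRange 0 ((arr.length : Int) - d + 1)).map
      (fun i => ((PySem.Set.ofList (PySem.List.slice arr (some i) (some (i + d)))).length : Int))
  (PySem.List.min? counts (fun x => x)).getD 0

-- ===== PRECONDITION & SPEC =====
-- the natural domain: a nonnegative window size d not exceeding len(arr); outside it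
-- (d < 0, or d > len(arr)) A raises IndexError and B raises ValueError/returns nothing claimed
def Pre_minimalTv (arr : List Int) (d : Int) : Prop := 0 ≤ d ∧ d ≤ arr.length
instance (arr : List Int) (d : Int) : Decidable (Pre_minimalTv arr d) := by
  unfold Pre_minimalTv; infer_instance

def pvWitness_minimalTv : List Int × Int := ([1, 2, 1], 2)

def Spec_minimalTv (arr : List Int) (d : Int) (out : Int) : Prop := out = minimalTv_alt arr d
instance (arr : List Int) (d : Int) (out : Int) : Decidable (Spec_minimalTv arr d out) := by
  unfold Spec_minimalTv; infer_instance

-- ===== CLAIM (what is proved, stated in full; the proofs are below) =====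
def Claim_equal_minimalTv : Prop := ∀ (arr : List Int) (d : Int),
  Dom_minimalTv arr d → Pre_minimalTv arr d → Spec_minimalTv arr d (minimalTv arr d)

-- ===== LEMMAS AND PROOFS =====

-- the window of length dn starting at s, and its distinct count
def winTv (arr : List Int) (dn s : Nat) : List Int := (arr.drop s).take dn
def fcntTv (arr : List Int) (dn s : Nat) : Int :=
  ((PySem.Set.ofList (winTv arr dn s)).length : Int)

-- invariant carried by A's dict: nodup keys, values = multiplicities in the window, keys = its support
def InvTv (arr : List Int) (dn s : Nat) (w : PySem.Dict Int Int) : Prop :=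
  w.keys.Nodup ∧ (∀ k, w.getD k 0 = ((winTv arr dn s).count k : Int)) ∧
    (∀ k, k ∈ w.keys ↔ k ∈ winTv arr dn s)

lemma size_of_inv (arr : List Int) (dn s : Nat) (w : PySem.Dict Int Int)
    (h : InvTv arr dn s w) : (w.size : Int) = fcntTv arr dn s := by
  have hperm : w.keys.Perm (PySem.Set.ofList (winTv arr dn s)) :=
    (List.perm_ext_iff_of_nodup h.1 (PySem.Set.nodup_ofList _)).2
      (fun a => by rw [h.2.2 a, PySem.Set.mem_ofList])
  have hlen : w.keys.length = (PySem.Set.ofList (winTv arr dn s)).length := hperm.length_eq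
  have hsz : w.size = w.keys.length := by simp [PySem.Dict.size, PySem.Dict.keys]
  rw [fcntTv, hsz, hlen]

lemma find?_filter_ne (l : List (Int × Int)) (k k' : Int) (h : k' ≠ k) :
    (l.filter (fun p => !(p.1 == k))).find? (fun p => p.1 == k') =
      l.find? (fun p => p.1 == k') := by
  induction l with
  | nil => rfl
  | cons p t ih =>
    by_cases hpk : p.1 = k
    · rw [List.filter_cons_of_neg (by simp [hpk]),
        List.find?_cons_of_neg (by simp [hpk]; exact Ne.symm h), ih]
    · rw [List.filter_cons_of_pos (by simp [hpk])]
      by_cases hpk' : p.1 = k'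
      · rw [List.find?_cons_of_pos (by simp [hpk']), List.find?_cons_of_pos (by simp [hpk'])]
      · rw [List.find?_cons_of_neg (by simp [hpk']), List.find?_cons_of_neg (by simp [hpk']), ih]

lemma getD_erase (w : PySem.Dict Int Int) (k k' : Int) :
    (w.erase k).getD k' 0 = if k' = k then 0 else w.getD k' 0 := by
  by_cases hkk : k' = k
  · subst hkk
    have hf : ((w.items.filter (fun p => !(p.1 == k'))).find? (fun p => p.1 == k')) = none := by
      rw [List.find?_eq_none]
      intro p hp
      simpa using List.of_mem_filter hp
    simp [PySem.Dict.getD, PySem.Dict.get?, PySem.Dict.erase, hf]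
  · rw [if_neg hkk]
    simp only [PySem.Dict.getD, PySem.Dict.get?, PySem.Dict.erase]
    rw [find?_filter_ne _ _ _ hkk]

lemma keys_erase (w : PySem.Dict Int Int) (k : Int) :
    (w.erase k).keys = w.keys.filter (fun x => !(x == k)) := by
  simp [PySem.Dict.erase, PySem.Dict.keys, List.filter_map]
  rfl

lemma foldl_min_of_le (l : List Int) (m : Int) (h : ∀ x ∈ l, m ≤ x) :
    l.foldl min m = m := by
  induction l with
  | nil => rfl
  | cons x t ih =>
    simp only [List.foldl_cons, min_eq_left (h x (by simp))]
    exact ih (fun y hy => h y (by simp [hy]))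

-- one step of A's loop preserves the invariant and records the next window's distinct count
lemma stepA_inv (arr : List Int) (dn s : Nat) (hd : 1 ≤ dn) (hsn : s + dn < arr.length)
    (w : PySem.Dict Int Int) (m : Int) (hInv : InvTv arr dn s w) :
    ∃ w', stepA arr (((s : Nat) : Int), w, m) (((s + dn : Nat) : Int)) =
        (((s + 1 : Nat) : Int), w', min m (fcntTv arr dn (s + 1))) ∧
      InvTv arr dn (s + 1) w' := by
  obtain ⟨hnd, hval, hmem⟩ := hInv
  have hs : s < arr.length := by omega
  obtain ⟨e, he⟩ : ∃ e, dn = e + 1 := ⟨dn - 1, by omega⟩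
  set kL := arr[s] with hkL
  set kR := arr[s + dn]'hsn with hkR
  set M : List Int := (arr.drop (s + 1)).take e with hM
  have hW : winTv arr dn s = kL :: M := by
    rw [winTv, List.drop_eq_getElem_cons hs, he]
    rfl
  have hW1 : winTv arr dn (s + 1) = M ++ [kR] := by
    have hidx : e < (arr.drop (s + 1)).length := by
      rw [List.length_drop]; omega
    rw [winTv, he, List.take_add_one, List.getElem?_eq_getElem hidx]
    have hde : (arr.drop (s + 1))[e] = kR := by
      rw [List.getElem_drop]
      rw [hkR]
      congr 1
      omega
    rw [hde]
    rfl
  have hgL : PySem.List.pyGetD arr ((s : Nat) : Int) 0 = kL := by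
    rw [PySem.List.pyGetD_natCast, List.getD_eq_getElem arr 0 hs]
  have hgR : PySem.List.pyGetD arr ((s + dn : Nat) : Int) 0 = kR := by
    rw [PySem.List.pyGetD_natCast, List.getD_eq_getElem arr 0 hsn]
  have hwkL : w.getD kL 0 = ((M.count kL : Nat) : Int) + 1 := by
    rw [hval kL, hW, List.count_cons_self]
    push_cast
    ring
  set w1 := w.modify kL 0 (· - 1) with hw1
  have hval1kL : w1.getD kL 0 = ((M.count kL : Nat) : Int) := by
    rw [hw1, PySem.Dict.getD_modify, if_pos rfl, hwkL]
    ring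
  have hval1 : ∀ k, k ≠ kL → w1.getD k 0 = (((winTv arr dn s).count k : Nat) : Int) := by
    intro k hk
    rw [hw1, PySem.Dict.getD_modify, if_neg hk, hval]
  have hnd1 : w1.keys.Nodup := by
    rw [hw1, PySem.Dict.keys_modify]
    exact PySem.Dict.nodup_keys_insert _ _ _ hnd
  have hmem1 : ∀ k, k ∈ w1.keys ↔ (k = kL ∨ k ∈ winTv arr dn s) := by
    intro k
    rw [hw1, PySem.Dict.keys_modify, PySem.Dict.mem_keys_insert]
    exact or_congr Iff.rfl (hmem k)
  -- common final step: adding arr[s+dn] to any dict that represents M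
  have key : ∀ w2 : PySem.Dict Int Int, w2.keys.Nodup →
      (∀ k, w2.getD k 0 = ((M.count k : Nat) : Int)) → (∀ k, k ∈ w2.keys ↔ k ∈ M) →
      InvTv arr dn (s + 1) (w2.modify kR 0 (· + 1)) ∧
        (((w2.modify kR 0 (· + 1)).size : Nat) : Int) = fcntTv arr dn (s + 1) := by
    intro w2 hnd2 hval2 hmem2
    have hnd3 : (w2.modify kR 0 (· + 1)).keys.Nodup := by
      rw [PySem.Dict.keys_modify]
      exact PySem.Dict.nodup_keys_insert _ _ _ hnd2
    have hval3 : ∀ k, (w2.modify kR 0 (· + 1)).getD k 0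
        = (((winTv arr dn (s + 1)).count k : Nat) : Int) := by
      intro k
      rw [PySem.Dict.getD_modify, hW1]
      by_cases hk : k = kR
      · rw [if_pos hk, hval2 kR, hk, List.count_append]
        push_cast [List.count_cons_self, List.count_nil]
        ring
      · rw [if_neg hk, hval2 k, List.count_append]
        simp [hk, eq_comm]
    have hmem3 : ∀ k, k ∈ (w2.modify kR 0 (· + 1)).keys ↔ k ∈ winTv arr dn (s + 1) := by
      intro k
      rw [PySem.Dict.keys_modify, PySem.Dict.mem_keys_insert, hmem2 k, hW1]
      simp [List.mem_append, or_comm]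
    have hinv3 : InvTv arr dn (s + 1) (w2.modify kR 0 (· + 1)) := ⟨hnd3, hval3, hmem3⟩
    exact ⟨hinv3, size_of_inv _ _ _ _ hinv3⟩
  by_cases hc : kL ∈ M
  · -- the leaving element still occurs in the rest of the window: no deletion
    have hcpos : M.count kL ≠ 0 := Nat.pos_iff_ne_zero.mp (List.count_pos_iff.mpr hc)
    have hcond : ¬ (w1.getD kL 0 = 0) := by
      rw [hval1kL]
      exact_mod_cast hcpos
    have hval2 : ∀ k, w1.getD k 0 = ((M.count k : Nat) : Int) := by
      intro k
      by_cases hk : k = kL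
      · rw [hk, hval1kL]
      · rw [hval1 k hk, hW, List.count_cons_of_ne (Ne.symm hk)]
    have hmem2 : ∀ k, k ∈ w1.keys ↔ k ∈ M := by
      intro k
      rw [hmem1 k, hW]
      simp only [List.mem_cons]
      constructor
      · rintro (rfl | rfl | h)
        · exact hc
        · exact hc
        · exact h
      · exact fun h => Or.inr (Or.inr h)
    obtain ⟨hinv3, hsz3⟩ := key w1 hnd1 hval2 hmem2
    refine ⟨w1.modify kR 0 (· + 1), ?_, hinv3⟩
    simp only [stepA, hgL, hgR, ← hw1, if_neg hcond]
    rw [hsz3]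
    rw [show ((s : Nat) : Int) + 1 = (((s + 1 : Nat)) : Int) by push_cast; ring]
  · -- the leaving element vanishes from the window: it is deleted
    have hcount0 : M.count kL = 0 := List.count_eq_zero.2 hc
    have hcond : w1.getD kL 0 = 0 := by
      rw [hval1kL, hcount0]
      rfl
    have hval2 : ∀ k, (w1.erase kL).getD k 0 = ((M.count k : Nat) : Int) := by
      intro k
      rw [getD_erase]
      by_cases hk : k = kL
      · rw [if_pos hk, hk, hcount0]
        rfl
      · rw [if_neg hk, hval1 k hk, hW, List.count_cons_of_ne (Ne.symm hk)]
    have hmem2 : ∀ k, k ∈ (w1.erase kL).keys ↔ k ∈ M := by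
      intro k
      rw [keys_erase, List.mem_filter]
      simp only [Bool.not_eq_eq_eq_not, Bool.not_true, beq_eq_false_iff_ne, ne_eq, hmem1 k, hW,
        List.mem_cons]
      constructor
      · rintro ⟨h1 | h1, h2⟩
        · exact absurd h1 h2
        · rcases h1 with h1 | h1
          · exact absurd h1 h2
          · exact h1
      · intro hkM
        exact ⟨Or.inr (Or.inr hkM), fun hkk => hc (hkk ▸ hkM)⟩
    have hnd2 : (w1.erase kL).keys.Nodup := by
      rw [keys_erase]
      exact hnd1.filter _
    obtain ⟨hinv3, hsz3⟩ := key (w1.erase kL) hnd2 hval2 hmem2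
    refine ⟨(w1.erase kL).modify kR 0 (· + 1), ?_, hinv3⟩
    simp only [stepA, hgL, hgR, ← hw1, if_pos hcond]
    rw [hsz3]
    rw [show ((s : Nat) : Int) + 1 = (((s + 1 : Nat)) : Int) by push_cast; ring]

-- unrolled main loop of A
lemma loopA (arr : List Int) (dn : Nat) (hd : 1 ≤ dn) :
    ∀ (t s : Nat) (w : PySem.Dict Int Int) (m : Int), s + dn + t = arr.length →
      InvTv arr dn s w →
      ((PySem.List.pyRange ((s + dn : Nat) : Int) ((arr.length : Nat) : Int)).foldl
          (stepA arr) (((s : Nat) : Int), w, m)).2.2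
        = (List.range t).foldl (fun acc j => min acc (fcntTv arr dn (s + 1 + j))) m := by
  intro t
  induction t with
  | zero =>
    intro s w m h _
    rw [show ((arr.length : Nat) : Int) = ((s + dn : Nat) : Int) by rw [← h]; push_cast; ring]
    rw [PySem.List.pyRange_one_eq_nil le_rfl]
    simp
  | succ t ih =>
    intro s w m h hInv
    have hlt : s + dn < arr.length := by omega
    have hlt' : ((s + dn : Nat) : Int) < ((arr.length : Nat) : Int) := by exact_mod_cast hlt
    rw [PySem.List.pyRange_one_cons hlt', List.foldl_cons]
    obtain ⟨w', hstep, hinv'⟩ := stepA_inv arr dn s hd hlt w m hInv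
    rw [hstep]
    rw [show ((s + dn : Nat) : Int) + 1 = (((s + 1) + dn : Nat) : Int) by push_cast; ring]
    rw [ih (s + 1) w' (min m (fcntTv arr dn (s + 1))) (by omega) hinv']
    rw [List.range_succ_eq_map, List.foldl_cons, List.foldl_map]
    rw [show s + 1 + 0 = s + 1 by omega]
    apply PySem.List.foldl_congr_mem
    intro acc x _
    rw [show s + 1 + (x + 1) = s + 1 + 1 + x by omega]

lemma foldl_range_getD {β : Type} (arr : List Int) (m : Nat)
    (g : β → Int → β) (init : β) : m ≤ arr.length →
    (List.range m).foldl (fun acc k => g acc (arr.getD k 0)) init = (arr.take m).foldl g init := by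
  induction m with
  | zero => intro _; simp
  | succ m ih =>
    intro hm
    have hml : m < arr.length := by omega
    rw [List.range_succ, List.foldl_append, ih (by omega), List.take_add_one,
      List.foldl_append, List.getElem?_eq_getElem hml]
    simp [List.getD, List.getElem?_eq_getElem hml]

lemma prefillA (arr : List Int) (dn : Nat) (hlen : dn ≤ arr.length) :
    (PySem.List.pyRange 0 ((dn : Nat) : Int)).foldl
        (fun w i => w.modify (PySem.List.pyGetD arr i 0) 0 (· + 1)) PySem.Dict.empty
      = PySem.Dict.counter (arr.take dn) := by
  rw [PySem.List.pyRange_zero_natCast, List.foldl_map]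
  simp only [PySem.List.pyGetD_natCast]
  rw [PySem.Dict.counter_eq_foldl]
  exact foldl_range_getD arr dn (fun (w : PySem.Dict Int Int) x => w.modify x 0 (· + 1)) PySem.Dict.empty hlen

lemma minimalTv_char (arr : List Int) (dn : Nat) (hd : 1 ≤ dn) (hlen : dn ≤ arr.length) :
    minimalTv arr ((dn : Nat) : Int)
      = (List.range (arr.length - dn)).foldl
          (fun acc j => min acc (fcntTv arr dn (1 + j))) (fcntTv arr dn 0) := by
  simp only [minimalTv]
  rw [prefillA arr dn hlen]
  have hinv0 : InvTv arr dn 0 (PySem.Dict.counter (arr.take dn)) := by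
    refine ⟨PySem.Dict.nodup_keys_counter _, ?_, ?_⟩
    · intro k
      rw [PySem.Dict.getD_counter]
      simp [winTv]
    · intro k
      rw [PySem.Dict.keys_counter, PySem.Set.mem_ofList]
      simp [winTv]
  have hsz := size_of_inv arr dn 0 _ hinv0
  have hloop := loopA arr dn hd (arr.length - dn) 0
    (PySem.Dict.counter (arr.take dn)) (((PySem.Dict.counter (arr.take dn)).size : Nat) : Int)
    (by omega) hinv0
  simp only [Nat.zero_add, Nat.cast_zero] at hloop
  rw [hloop, hsz]

lemma minimalTv_alt_char (arr : List Int) (dn : Nat) (hlen : dn ≤ arr.length) :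
    minimalTv_alt arr ((dn : Nat) : Int)
      = (List.range (arr.length - dn)).foldl
          (fun acc j => min acc (fcntTv arr dn (j + 1))) (fcntTv arr dn 0) := by
  simp only [minimalTv_alt]
  have hcast : ((arr.length : Int) - (dn : Int) + 1) = (((arr.length - dn + 1 : Nat)) : Int) := by
    have := hlen; push_cast [this]; ring
  rw [hcast, PySem.List.pyRange_zero_natCast, List.map_map]
  have hfun : ((fun i => ((PySem.Set.ofList (PySem.List.slice arr (some i) (some (i + (dn : Int))))).length : Int))
      ∘ fun (k : Nat) => (k : Int)) = fcntTv arr dn := by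
    funext k
    simp only [Function.comp_apply, PySem.List.slice_natCast_add, fcntTv, winTv]
  rw [hfun, List.range_succ_eq_map, List.map_cons, PySem.List.min?_id_cons]
  simp only [Option.getD_some, List.map_map]
  rw [List.foldl_map]
  rfl

lemma stepA_snd_zero (arr : List Int) :
    ∀ (l : List Int) (st : Int × PySem.Dict Int Int × Int), st.2.2 = 0 →
      ((l.foldl (stepA arr) st).2.2) = 0 := by
  intro l
  induction l with
  | nil => intro st h; simpa using h
  | cons r t ih =>
    intro st h
    rw [List.foldl_cons]
    apply ih
    simp only [stepA]
    rw [h]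
    exact min_eq_left (Int.natCast_nonneg _)

lemma minimalTv_zero (arr : List Int) : minimalTv arr 0 = 0 := by
  simp only [minimalTv]
  rw [PySem.List.pyRange_one_eq_nil le_rfl]
  simp only [List.foldl_nil]
  apply stepA_snd_zero
  simp [PySem.Dict.size, PySem.Dict.empty]

lemma minimalTv_alt_zero (arr : List Int) : minimalTv_alt arr 0 = 0 := by
  simp only [minimalTv_alt]
  have hcast : ((arr.length : Int) - 0 + 1) = (((arr.length + 1 : Nat)) : Int) := by push_cast; ring
  rw [hcast, PySem.List.pyRange_zero_natCast, List.map_map]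
  have hfun : ((fun i => ((PySem.Set.ofList (PySem.List.slice arr (some i) (some (i + (0 : Int))))).length : Int))
      ∘ fun (k : Nat) => (k : Int)) = fun _ => (0 : Int) := by
    funext k
    simp [Function.comp_apply, PySem.List.slice_natCast, PySem.Set.ofList]
  rw [hfun, List.range_succ_eq_map, List.map_cons, PySem.List.min?_id_cons]
  simp only [Option.getD_some]
  apply foldl_min_of_le
  intro x hx
  simp only [List.map_map, List.mem_map] at hx
  obtain ⟨y, _, rfl⟩ := hx
  exact le_refl 0

-- ===== VERDICT (by name: the statement is the Claim_ definition above) =====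
theorem minimalTv_spec : Claim_equal_minimalTv := by
  intro arr d _ hpre
  obtain ⟨hd0, hdl⟩ := hpre
  obtain ⟨dn, rfl⟩ := Int.eq_ofNat_of_zero_le hd0
  have hlen : dn ≤ arr.length := by exact_mod_cast hdl
  unfold Spec_minimalTv
  rcases Nat.eq_zero_or_pos dn with h0 | h1
  · subst h0
    simp only [Nat.cast_zero, minimalTv_zero, minimalTv_alt_zero]
  · rw [minimalTv_char arr dn h1 hlen, minimalTv_alt_char arr dn hlen]
    apply PySem.List.foldl_congr_mem
    intro acc x _
    rw [Nat.add_comm 1 x]
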